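-- pv_equiv track=rewrite | github.com/MrBrantCode/unitest_baseline | mut_generate/mist_train_cf/cf_57330/solution.py | prime_numbers
-- ===== SOURCE A (Python) =====
-- def prime_numbers(n, m):
--     sieve = [True] * (n+1)
--     p = 2
--     while p * p <= n:
--         if sieve[p] is True:
--             for i in range(p * p, n+1, p):
--                 sieve[i] = False
--         p += 1
--
--     primes = [p for p in range(2, n+1) if sieve[p]]
--     return primes[m-1]
-- ===== SOURCE B (Python) =====
-- def prime_numbers(n, m):
--     primes = []
--     for k in range(2, n + 1):
--         is_p = True
--         for p in primes:
--             if p * p > k: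
--                 break
--             if k % p == 0:
--                 is_p = False
--                 break
--         if is_p:
--             primes.append(k)
--     return primes[m - 1]
-- ===== Notes on version B (the rewrite author's own statement) =====
-- stated objective: alternative
-- what changed: Replaces the allocated composite-marking sieve (outer p-loop crossing off multiples in a boolean table) with per-number trial division by the already-collected primes up to sqrt(k), appending primes in ascending order; the final primes[m-1] indexing is identical.
import Mathlib
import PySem

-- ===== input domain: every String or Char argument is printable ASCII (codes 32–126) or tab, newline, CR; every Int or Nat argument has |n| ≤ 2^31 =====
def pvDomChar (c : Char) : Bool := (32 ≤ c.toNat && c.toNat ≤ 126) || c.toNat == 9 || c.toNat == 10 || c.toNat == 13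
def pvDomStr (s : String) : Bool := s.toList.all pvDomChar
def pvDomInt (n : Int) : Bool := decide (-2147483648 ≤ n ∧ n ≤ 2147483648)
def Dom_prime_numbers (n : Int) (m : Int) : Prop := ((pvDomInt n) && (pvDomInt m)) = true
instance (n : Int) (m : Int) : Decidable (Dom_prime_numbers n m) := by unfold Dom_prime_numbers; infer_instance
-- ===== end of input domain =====

-- B replaces A's allocated composite-marking sieve by per-number trial division by the
-- already-collected primes up to sqrt(k) (objective: alternative algorithm, same results,
-- including the final primes[m-1] indexing).

-- ===== PORT A =====
-- inner 'for i in range(p*p, n+1, p): sieve[i] = False' (indices are always in range in A,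
-- so setIfInBounds never silently drops a write Python would have raised on)
def pvMarkA (s : Array Bool) (idxs : List Int) : Array Bool :=
  idxs.foldl (fun t i => t.setIfInBounds i.toNat false) s

-- outer 'while p * p <= n' loop of A (p only ever ≥ 2, so the sieve[p] read is in range;
-- the getD default is never used)
def pvSieveLoopA (n : Int) (p : Int) (s : Array Bool) : Array Bool :=
  if _h : p * p ≤ n then
    pvSieveLoopA n (p + 1)
      (if s.getD p.toNat false then pvMarkA s (PySem.List.pyRange (p * p) (n + 1) p) else s)
  else s
termination_by (n + 1 - p).toNat
decreasing_by
  have hp : p ≤ p * p := by rcases le_total p 0 with h0 | h0 <;> nlinarith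
  omega

def prime_numbers (n : Int) (m : Int) : Int :=
  let sieve := pvSieveLoopA n 2 (Array.replicate (n + 1).toNat true)
  let primes := (PySem.List.pyRange 2 (n + 1) 1).filter (fun p => sieve.getD p.toNat false)
  -- primes[m-1]; Pre_ guarantees the index is valid, so the '.getD 0' default is never the result
  (PySem.List.pyGet? primes (m - 1)).getD 0

-- ===== PORT B =====
-- B's inner 'for p in primes: if p*p > k: break; if k % p == 0: is_p = False; break'
def pvTrialA (k : Int) (primes : Array Int) (i : Nat) : Bool :=
  if h : i < primes.size then
    if k < primes[i] * primes[i] then true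
    else if PySem.Int.mod k primes[i] = 0 then false
    else pvTrialA k primes (i + 1)
  else true
termination_by primes.size - i

-- B's outer 'for k in range(2, n+1)' loop with 'primes.append(k)'
def pvBuildA (ks : List Int) (primes : Array Int) : Array Int :=
  match ks with
  | [] => primes
  | k :: rest => pvBuildA rest (if pvTrialA k primes 0 then primes.push k else primes)

def prime_numbers_alt (n : Int) (m : Int) : Int :=
  let primes := pvBuildA (PySem.List.pyRange 2 (n + 1) 1) #[]
  (PySem.List.pyGet? primes.toList (m - 1)).getD 0

-- ===== PRECONDITION & SPEC =====
-- Pre_-only helpers: a spec-level prime counter (plain byte sieve with a counting pass),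
-- used solely to state on which inputs Python's primes[m-1] is a valid index. It shares no
-- definition with either port and no proof mentions it. (Structural recursion on a step
-- counter so that the witness check below is kernel-computable.)
def pvPreMark (a : Array UInt8) (i step : Nat) : Nat → Array UInt8
  | 0 => a
  | f + 1 => if i < a.size then pvPreMark (a.setIfInBounds i 1) (i + step) step f else a

def pvPreSieve (a : Array UInt8) (p : Nat) : Nat → Array UInt8
  | 0 => a
  | f + 1 =>
    if p * p < a.size then
      pvPreSieve (if a.getD p 0 == 0 then pvPreMark a (p * p) p a.size else a) (p + 1) f
    else a

def pvPreCount (a : Array UInt8) (k c : Nat) : Nat → Nat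
  | 0 => c
  | f + 1 => if k < a.size then pvPreCount a (k + 1) (if a.getD k 0 == 0 then c + 1 else c) f else c

def pvLog2 (n : Nat) : Nat → Nat
  | 0 => 0
  | f + 1 => if n ≤ 1 then 0 else pvLog2 (n / 2) f + 1

-- 'at least t primes ≤ n'. Early rejections are sound: π(n) ≤ n/3 + 4 for every n, and the
-- t-th prime is < t·(log2 t + 2) (Rosser), so counting up to min(n, that bound) is exact.
def pvAtLeastPrimes (n : Int) (t : Int) : Bool :=
  if n < 2 then false
  else if n + 12 < 3 * t then false
  else
    let tn := t.toNat
    let U := max 13 (tn * (pvLog2 tn 64 + 2))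
    let N := min (n.toNat + 1) (U + 1)
    let sieve := pvPreSieve (Array.replicate N 0) 2 N
    decide (tn ≤ pvPreCount sieve 2 0 N)

-- Pre_ excludes exactly the inputs where A raises IndexError: m-1 outside Python's valid
-- (wraparound-inclusive) index range for the list of primes ≤ n, i.e. π(n) < max(m, 1-m).
def Pre_prime_numbers (n : Int) (m : Int) : Prop :=
  pvAtLeastPrimes n (max m (1 - m)) = true
instance (n : Int) (m : Int) : Decidable (Pre_prime_numbers n m) := by
  unfold Pre_prime_numbers; infer_instance

def pvWitness_prime_numbers : Int × Int := (10, 4)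

def Spec_prime_numbers (n : Int) (m : Int) (out : Int) : Prop := out = prime_numbers_alt n m
instance (n : Int) (m : Int) (out : Int) : Decidable (Spec_prime_numbers n m out) := by unfold Spec_prime_numbers; infer_instance

-- ===== CLAIM (what is proved, stated in full; the proofs are below) =====
def Claim_equal_prime_numbers : Prop := ∀ (n : Int) (m : Int), Dom_prime_numbers n m → Pre_prime_numbers n m → Spec_prime_numbers n m (prime_numbers n m)

-- ===== LEMMAS AND PROOFS =====

-- ghost (proof-only) list-level mirrors of the two ports
def pvMark (s : List Bool) (idxs : List Int) : List Bool :=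
  idxs.foldl (fun t i => t.set i.toNat false) s

def pvSieveLoop (n : Int) (p : Int) (s : List Bool) : List Bool :=
  if _h : p * p ≤ n then
    pvSieveLoop n (p + 1)
      (if s.getD p.toNat false then pvMark s (PySem.List.pyRange (p * p) (n + 1) p) else s)
  else s
termination_by (n + 1 - p).toNat
decreasing_by
  have hp : p ≤ p * p := by rcases le_total p 0 with h0 | h0 <;> nlinarith
  omega

def pvTrial (k : Int) (d : Int) : Bool :=
  if _h : d * d ≤ k then
    if PySem.Int.mod k d = 0 then false else pvTrial k (d + 1)
  else true
termination_by (k + 1 - d).toNat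
decreasing_by
  have hd : d ≤ d * d := by rcases le_total d 0 with h0 | h0 <;> nlinarith
  omega

def pvTrialPL (k : Int) : List Int → Bool
  | [] => true
  | p :: ps => if k < p * p then true else if PySem.Int.mod k p = 0 then false else pvTrialPL k ps

-- the canonical ascending list of primes below b
def pvCl (b : Int) : List Int := (PySem.List.pyRange 2 b 1).filter (fun j => pvTrial j 2)

-- 'k has a divisor witness q with q*q ≤ k' — the characterisation all loops compute
def pvHasDiv (k : Int) : Prop := ∃ q : Int, 2 ≤ q ∧ q * q ≤ k ∧ q ∣ k

-- divisor witness below the current outer-loop bound p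
def pvBelow (n : Int) (p : Int) (j : Nat) : Prop :=
  ∃ q : Int, 2 ≤ q ∧ q < p ∧ q * q ≤ n ∧ q ∣ (j : Int) ∧ q * q ≤ (j : Int)

-- ---- Array↔List bridges ----

theorem pvArrGetD (a : Array Bool) (i : Nat) : a.getD i false = a.toList.getD i false := by
  rcases Nat.lt_or_ge i a.size with h | h
  · simp [Array.getD, h, List.getD_eq_getElem?_getD, Array.getElem_toList]
  · simp [Array.getD, Nat.not_lt.mpr h, List.getD_eq_getElem?_getD]

theorem pvMarkA_toList (idxs : List Int) (s : Array Bool) :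
    (pvMarkA s idxs).toList = pvMark s.toList idxs := by
  induction idxs generalizing s with
  | nil => simp [pvMarkA, pvMark]
  | cons i t ih =>
    simp only [pvMarkA, pvMark, List.foldl_cons] at *
    rw [ih]
    congr 1
    exact Array.toList_setIfInBounds

theorem pvSieveLoopA_toList (n : Int) (p : Int) (s : Array Bool) :
    (pvSieveLoopA n p s).toList = pvSieveLoop n p s.toList := by
  induction p, s using pvSieveLoopA.induct (n := n) with
  | case1 p s h ih =>
    rw [pvSieveLoopA, dif_pos h, pvSieveLoop, dif_pos h]
    by_cases hc : s.getD p.toNat false = true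
    · rw [dif_pos hc] at ih
      rw [if_pos hc, if_pos (by rw [← pvArrGetD]; exact hc), ih, pvMarkA_toList]
    · rw [dif_neg hc] at ih
      rw [if_neg hc, if_neg (by rw [← pvArrGetD]; exact hc), ih]
  | case2 p s h =>
    rw [pvSieveLoopA, dif_neg h, pvSieveLoop, dif_neg h]

theorem pvTrialA_eq (k : Int) (a : Array Int) (i : Nat) :
    pvTrialA k a i = pvTrialPL k (a.toList.drop i) := by
  induction i using pvTrialA.induct (k := k) (primes := a) with
  | case1 i h hlt =>
    rw [pvTrialA, dif_pos h,
      List.drop_eq_getElem_cons (by simpa using h)]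
    simp only [pvTrialPL, Array.getElem_toList, if_pos hlt]
  | case2 i h hlt hm =>
    rw [pvTrialA, dif_pos h,
      List.drop_eq_getElem_cons (by simpa using h)]
    simp only [pvTrialPL, Array.getElem_toList, if_neg hlt, if_pos hm]
  | case3 i h hlt hm ih =>
    rw [pvTrialA, dif_pos h,
      List.drop_eq_getElem_cons (by simpa using h)]
    simp only [pvTrialPL, Array.getElem_toList, if_neg hlt, if_neg hm]
    exact ih
  | case4 i h =>
    rw [pvTrialA, dif_neg h, List.drop_of_length_le (by simpa using Nat.le_of_not_lt h)]
    rfl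

-- ---- ghost sieve (port A side) correctness ----

theorem pvMark_getD_false (idxs : List Int) (s : List Bool) (j : Nat) :
    ((pvMark s idxs).getD j false = false) ↔
      ((∃ i ∈ idxs, i.toNat = j ∧ j < s.length) ∨ s.getD j false = false) := by
  induction idxs generalizing s with
  | nil => simp [pvMark]
  | cons i t ih =>
    simp only [pvMark, List.foldl_cons]
    rw [show List.foldl (fun t i => t.set i.toNat false) (s.set i.toNat false) t
          = pvMark (s.set i.toNat false) t from rfl, ih]
    have hslen : (s.set i.toNat false).length = s.length := by simp
    constructor
    · rintro (⟨i', hi', hij, hlt⟩ | hold)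
      · exact Or.inl ⟨i', List.mem_cons_of_mem _ hi', hij, by omega⟩
      · rcases Nat.lt_or_ge j s.length with hj | hj
        · by_cases hji : i.toNat = j
          · exact Or.inl ⟨i, List.mem_cons_self .., hji, hj⟩
          · right
            rw [List.getD_eq_getElem?_getD, List.getElem?_set, if_neg hji] at hold
            rw [List.getD_eq_getElem?_getD]; exact hold
        · right
          rw [List.getD_eq_getElem?_getD, List.getElem?_eq_none (by omega)]
          rfl
    · rintro (⟨i', hi', hij, hlt⟩ | hold)
      · rcases List.mem_cons.mp hi' with rfl | hmem
        · right
          rw [List.getD_eq_getElem?_getD, List.getElem?_set, if_pos hij,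
            if_pos (by omega : i'.toNat < s.length)]
          rfl
        · exact Or.inl ⟨i', hmem, hij, by omega⟩
      · rcases Nat.lt_or_ge j s.length with hj | hj
        · by_cases hji : i.toNat = j
          · right
            rw [List.getD_eq_getElem?_getD, List.getElem?_set, if_pos hji,
              if_pos (by omega : i.toNat < s.length)]
            rfl
          · right
            rw [List.getD_eq_getElem?_getD, List.getElem?_set, if_neg hji]
            rw [List.getD_eq_getElem?_getD] at hold; exact hold
        · right
          rw [List.getD_eq_getElem?_getD, List.getElem?_eq_none (by omega)]
          rfl

theorem pvSieve_inv (n : Int) (p : Int) (s : List Bool) :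
    2 ≤ p → s.length = (n + 1).toNat →
    (∀ j : Nat, j < (n + 1).toNat → (s.getD j false = false ↔ pvBelow n p j)) →
    ∀ j : Nat, j < (n + 1).toNat →
      ((pvSieveLoop n p s).getD j false = false ↔ pvHasDiv (j : Int)) := by
  induction p, s using pvSieveLoop.induct (n := n) with
  | case1 p s h ih =>
    intro hp hlen hinv j hj
    rw [pvSieveLoop, dif_pos h]
    have hpp : (0:Int) < p := by omega
    have hple : p ≤ p * p := by nlinarith
    refine ih (by omega) ?_ ?_ j hj
    · split
      · show (pvMark s _).length = _
        have : ∀ (idxs : List Int) (t : List Bool), (pvMark t idxs).length = t.length := by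
          intro idxs
          induction idxs with
          | nil => intro t; simp [pvMark]
          | cons i r ihr =>
            intro t
            simp only [pvMark, List.foldl_cons] at *
            exact (ihr _).trans (by simp)
        rw [this]; exact hlen
      · exact hlen
    · intro j hj
      have hjn : (j : Int) ≤ n := by omega
      by_cases hread : s.getD p.toNat false = true
      · rw [dif_pos hread, pvMark_getD_false, hinv j hj]
        constructor
        · rintro (⟨i, hi, hij, _⟩ | hold)
          · rw [PySem.List.mem_pyRange_iff_of_pos hpp] at hi
            obtain ⟨h1, h2, h3⟩ := hi
            have hsq : (0:Int) ≤ p * p := mul_self_nonneg p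
            have hi0 : (0:Int) ≤ i := le_trans hsq h1
            have hij' : (j : Int) = i := by omega
            refine ⟨p, by omega, by omega, h, ?_, by omega⟩
            rw [hij']
            have hdvd : p ∣ (i - p * p) + p * p := dvd_add h3 ⟨p, rfl⟩
            simpa using hdvd
          · obtain ⟨q, hq1, hq2, hq3, hq4, hq5⟩ := hold
            exact ⟨q, hq1, by omega, hq3, hq4, hq5⟩
        · rintro ⟨q, hq1, hq2, hq3, hq4, hq5⟩
          by_cases hqp : q < p
          · exact Or.inr ⟨q, hq1, hqp, hq3, hq4, hq5⟩
          · have hqp' : q = p := by omega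
            subst hqp'
            left
            refine ⟨(j : Int), ?_, by simp, by omega⟩
            rw [PySem.List.mem_pyRange_iff_of_pos hpp]
            exact ⟨hq5, by omega, dvd_sub hq4 ⟨q, rfl⟩⟩
      · rw [dif_neg hread, hinv j hj]
        -- sieve[p] is already False: p has a divisor witness r < p, reusable for p's multiples
        have hpn : p ≤ n := by omega
        have hplt : p.toNat < (n + 1).toNat := by omega
        have hfalse : s.getD p.toNat false = false := by
          cases hb : s.getD p.toNat false
          · rfl
          · exact absurd hb hread
        rw [hinv p.toNat hplt] at hfalse
        obtain ⟨r, hr1, hr2, hr3, hr4, hr5⟩ := hfalse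
        have hpc : ((p.toNat : Nat) : Int) = p := by omega
        rw [hpc] at hr4 hr5
        constructor
        · rintro ⟨q, hq1, hq2, hq3, hq4, hq5⟩
          exact ⟨q, hq1, by omega, hq3, hq4, hq5⟩
        · rintro ⟨q, hq1, hq2, hq3, hq4, hq5⟩
          by_cases hqp : q < p
          · exact ⟨q, hq1, hqp, hq3, hq4, hq5⟩
          · have hqp' : q = p := by omega
            subst hqp'
            exact ⟨r, hr1, hr2, hr3, dvd_trans hr4 hq4,
              le_trans hr5 (le_trans hple hq5)⟩
  | case2 p s h =>
    intro hp hlen hinv j hj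
    rw [pvSieveLoop, dif_neg h]
    rw [hinv j hj]
    constructor
    · rintro ⟨q, hq1, _, _, hq4, hq5⟩
      exact ⟨q, hq1, hq5, hq4⟩
    · rintro ⟨q, hq1, hq2, hq3⟩
      have hjn : (j : Int) ≤ n := by omega
      have hqn : q * q ≤ n := le_trans hq2 hjn
      have hqp : q < p := by
        by_contra hc
        have hc' : p ≤ q := by omega
        have : p * p ≤ q * q := mul_le_mul hc' hc' (by omega) (by omega)
        omega
      exact ⟨q, hq1, hqp, hqn, hq3, hq2⟩

theorem pvTrial_inv (k : Int) (d : Int) :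
    2 ≤ d →
    (pvTrial k d = true ↔ ¬ ∃ q : Int, d ≤ q ∧ q * q ≤ k ∧ q ∣ k) := by
  induction d using pvTrial.induct (k := k) with
  | case1 d h hmod =>
    intro hd
    rw [pvTrial, dif_pos h, if_pos hmod]
    have hdvd : d ∣ k := (PySem.Int.mod_eq_zero_iff_dvd k d).mp hmod
    simp only [Bool.false_eq_true, false_iff, not_not]
    exact ⟨d, le_refl d, h, hdvd⟩
  | case2 d h hmod ih =>
    intro hd
    rw [pvTrial, dif_pos h, if_neg hmod]
    rw [ih (by omega)]
    have hnd : ¬ d ∣ k := fun hdvd => hmod ((PySem.Int.mod_eq_zero_iff_dvd k d).mpr hdvd)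
    constructor
    · rintro hno ⟨q, hq1, hq2, hq3⟩
      by_cases hqd : q = d
      · exact hnd (hqd ▸ hq3)
      · exact hno ⟨q, by omega, hq2, hq3⟩
    · rintro hno ⟨q, hq1, hq2, hq3⟩
      exact hno ⟨q, by omega, hq2, hq3⟩
  | case3 d h =>
    intro hd
    rw [pvTrial, dif_neg h]
    simp only [true_iff]
    rintro ⟨q, hq1, hq2, hq3⟩
    have : d * d ≤ q * q := mul_le_mul hq1 hq1 (by omega) (by omega)
    omega

-- A's sieve filter equals the canonical prime list
theorem pvFiltersA_eq (n : Int) :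
    (PySem.List.pyRange 2 (n + 1) 1).filter
        (fun p => (pvSieveLoop n 2 (List.replicate (n + 1).toNat true)).getD p.toNat false)
      = pvCl (n + 1) := by
  apply List.filter_congr
  intro k hk
  rw [PySem.List.mem_pyRange_one] at hk
  obtain ⟨hk2, hkn⟩ := hk
  have hjlt : k.toNat < (n + 1).toNat := by omega
  have hkc : ((k.toNat : Nat) : Int) = k := by omega
  have hsieve := pvSieve_inv n 2 (List.replicate (n + 1).toNat true) (le_refl 2)
    (by simp)
    (by
      intro j hj
      rw [List.getD_eq_getElem?_getD, List.getElem?_replicate, if_pos hj]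
      constructor
      · intro hc; exact absurd hc (by simp)
      · rintro ⟨q, hq1, hq2, _⟩; omega)
    k.toNat hjlt
  have htrial := pvTrial_inv k 2 (le_refl 2)
  rw [hkc] at hsieve
  cases hb1 : (pvSieveLoop n 2 (List.replicate (n + 1).toNat true)).getD k.toNat false
    <;> cases hb2 : pvTrial k 2
  · rfl
  · exfalso
    rw [hb1] at hsieve; rw [hb2] at htrial
    exact (htrial.mp rfl) (hsieve.mp rfl)
  · exfalso
    rw [hb1] at hsieve; rw [hb2] at htrial
    have h1 : ¬ pvHasDiv k := by
      intro hc
      have := hsieve.mpr hc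
      simp at this
    have h2 : pvHasDiv k := by
      by_contra hno
      have := htrial.mpr hno
      simp at this
    exact h1 h2
  · rfl

-- ---- trial division by collected primes (port B side) correctness ----

theorem pvTrialPL_false_hasdiv (k : Int) (L : List Int) (h2 : ∀ p ∈ L, 2 ≤ p)
    (hf : pvTrialPL k L = false) : pvHasDiv k := by
  induction L with
  | nil => simp [pvTrialPL] at hf
  | cons p t ih =>
    simp only [pvTrialPL] at hf
    by_cases h1 : k < p * p
    · rw [if_pos h1] at hf; simp at hf
    · rw [if_neg h1] at hf
      by_cases h2' : PySem.Int.mod k p = 0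
      · exact ⟨p, h2 p (List.mem_cons_self ..), by omega,
          (PySem.Int.mod_eq_zero_iff_dvd k p).mp h2'⟩
      · rw [if_neg h2'] at hf
        exact ih (fun q hq => h2 q (List.mem_cons_of_mem _ hq)) hf

theorem pvTrialPL_hits (k r : Int) (hr2 : 2 ≤ r) (hrr : r * r ≤ k) (hrd : r ∣ k)
    (hmin : ∀ p : Int, 2 ≤ p → p < r → ¬ p ∣ k) :
    ∀ L : List Int, List.Pairwise (· < ·) L → (∀ p ∈ L, 2 ≤ p) → r ∈ L →
      pvTrialPL k L = false := by
  intro L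
  induction L with
  | nil => simp
  | cons p t ih =>
    intro hpw h2 hmem
    simp only [pvTrialPL]
    rcases List.mem_cons.mp hmem with rfl | hmt
    · rw [if_neg (not_lt.mpr hrr), if_pos ((PySem.Int.mod_eq_zero_iff_dvd k r).mpr hrd)]
    · have hpr : p < r := (List.pairwise_cons.mp hpw).1 r hmt
      have hp2 : 2 ≤ p := h2 p (List.mem_cons_self ..)
      have hppk : p * p < r * r := by nlinarith
      rw [if_neg (not_lt.mpr (le_of_lt (lt_of_lt_of_le hppk hrr))),
        if_neg (fun hm => hmin p hp2 hpr ((PySem.Int.mod_eq_zero_iff_dvd k p).mp hm))]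
      exact ih (List.pairwise_cons.mp hpw).2 (fun q hq => h2 q (List.mem_cons_of_mem _ hq)) hmt

theorem pvCl_sorted (b : Int) : (pvCl b).Pairwise (· < ·) :=
  List.Pairwise.filter _ (PySem.List.pairwise_lt_pyRange_one 2 b)

theorem pvCl_two_le (b : Int) : ∀ p ∈ pvCl b, 2 ≤ p := by
  intro p hp
  have := (List.mem_filter.mp hp).1
  exact ((PySem.List.mem_pyRange_one ..).mp this).1

-- trial division by the primes collected so far decides exactly what full trial division does
theorem pvTrialPrimes_eq (k : Int) (_hk : 2 ≤ k) : pvTrialPL k (pvCl k) = pvTrial k 2 := by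
  have htr := pvTrial_inv k 2 (le_refl 2)
  by_cases hd : pvHasDiv k
  · obtain ⟨q, hq2, hqq, hqd⟩ := hd
    have hk4 : 4 ≤ k := by nlinarith
    have hkn1 : k.toNat ≠ 1 := by omega
    have hrp : Nat.Prime k.toNat.minFac := Nat.minFac_prime hkn1
    have hr2 : 2 ≤ (k.toNat.minFac : Int) := by exact_mod_cast hrp.two_le
    have hktn : ((k.toNat : Nat) : Int) = k := by omega
    have hrd : (k.toNat.minFac : Int) ∣ k := by
      have := Int.natCast_dvd_natCast.mpr (Nat.minFac_dvd k.toNat)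
      rwa [hktn] at this
    have hqdn : q.toNat ∣ k.toNat := by
      have h1 : ((q.toNat : Int)) ∣ ((k.toNat : Int)) := by
        rw [Int.toNat_of_nonneg (by omega : (0:Int) ≤ q), Int.toNat_of_nonneg (by omega : (0:Int) ≤ k)]
        exact hqd
      exact_mod_cast h1
    have hrq : (k.toNat.minFac : Int) ≤ q := by
      have := Nat.minFac_le_of_dvd (m := q.toNat) (by omega) hqdn
      omega
    have hrr : (k.toNat.minFac : Int) * (k.toNat.minFac : Int) ≤ k :=
      le_trans (mul_le_mul hrq hrq (by omega) (by omega)) hqq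
    have hmin : ∀ p : Int, 2 ≤ p → p < (k.toNat.minFac : Int) → ¬ p ∣ k := by
      intro p hp2 hpr hdvd
      have hpd : p.toNat ∣ k.toNat := by
        have h1 : ((p.toNat : Int)) ∣ ((k.toNat : Int)) := by
          rw [Int.toNat_of_nonneg (by omega : (0:Int) ≤ p), Int.toNat_of_nonneg (by omega : (0:Int) ≤ k)]
          exact hdvd
        exact_mod_cast h1
      have := Nat.minFac_le_of_dvd (m := p.toNat) (by omega) hpd
      omega
    have hrk : (k.toNat.minFac : Int) < k := by nlinarith
    have hrCl : (k.toNat.minFac : Int) ∈ pvCl k := by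
      apply List.mem_filter.mpr
      refine ⟨(PySem.List.mem_pyRange_one ..).mpr ⟨hr2, hrk⟩, ?_⟩
      rw [pvTrial_inv _ 2 (le_refl 2)]
      rintro ⟨d, hd2, hdd, hddvd⟩
      have hdr : d < (k.toNat.minFac : Int) := by nlinarith
      exact hmin d hd2 hdr (dvd_trans hddvd hrd)
    rw [pvTrialPL_hits k _ hr2 hrr hrd hmin (pvCl k) (pvCl_sorted k) (pvCl_two_le k) hrCl]
    cases hb : pvTrial k 2
    · rfl
    · exfalso
      rw [hb] at htr
      exact (htr.mp rfl) ⟨q, hq2, hqq, hqd⟩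
  · cases hb1 : pvTrialPL k (pvCl k)
    · exact absurd (pvTrialPL_false_hasdiv k (pvCl k) (pvCl_two_le k) hb1) hd
    · cases hb : pvTrial k 2
      · exfalso
        rw [hb] at htr
        apply hd
        by_contra hno
        have := htr.mpr hno
        simp at this
      · rfl

-- B's accumulation loop builds exactly the canonical prime list
theorem pvBuild_inv (n : Int) :
    ∀ (f : Nat) (k : Int) (a : Array Int), (n + 1 - k).toNat ≤ f → 2 ≤ k →
      a.toList = pvCl k →
      (pvBuildA (PySem.List.pyRange k (n + 1) 1) a).toList = pvCl (max k (n + 1)) := by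
  intro f
  induction f with
  | zero =>
    intro k a hf hk ha
    rw [PySem.List.pyRange_one_eq_nil (by omega)]
    simp only [pvBuildA]
    rw [ha]
    congr 1
    omega
  | succ f ih =>
    intro k a hf hk ha
    by_cases hkn : k < n + 1
    · rw [PySem.List.pyRange_one_cons hkn]
      simp only [pvBuildA]
      have htr : pvTrialA k a 0 = pvTrial k 2 := by
        rw [pvTrialA_eq, List.drop_zero, ha, pvTrialPrimes_eq k hk]
      have hstep : (if pvTrialA k a 0 then a.push k else a).toList = pvCl (k + 1) := by
        have hcl : pvCl (k + 1) = pvCl k ++ List.filter (fun j => pvTrial j 2) [k] := by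
          simp only [pvCl]
          rw [PySem.List.pyRange_one_succ_right (by omega), List.filter_append]
        rw [htr, hcl]
        cases hb : pvTrial k 2
        · simp only [if_neg Bool.false_ne_true]
          rw [ha]
          simp [List.filter, hb]
        · rw [if_pos rfl, Array.toList_push, ha]
          simp [List.filter, hb]
      have := ih (k + 1) _ (by omega) (by omega) hstep
      rw [this]
      congr 1
      omega
    · rw [PySem.List.pyRange_one_eq_nil (by omega)]
      simp only [pvBuildA]
      rw [ha]
      congr 1
      omega

theorem pvAlt_primes (n : Int) :
    (pvBuildA (PySem.List.pyRange 2 (n + 1) 1) #[]).toList = pvCl (n + 1) := by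
  by_cases hn : n + 1 ≤ 2
  case pos =>
    rw [PySem.List.pyRange_one_eq_nil hn]
    simp only [pvBuildA]
    rw [pvCl, PySem.List.pyRange_one_eq_nil hn]
    rfl
  · have := pvBuild_inv n ((n + 1 - 2).toNat) 2 #[] (le_refl _) (le_refl 2)
      (by rw [show (#[] : Array Int).toList = ([] : List Int) from rfl, pvCl,
            PySem.List.pyRange_one_eq_nil (le_refl 2)]; rfl)
    rw [this]
    congr 1
    omega

-- ===== VERDICT (by name: the statement is the Claim_ definition above) =====
theorem prime_numbers_spec : Claim_equal_prime_numbers := by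
  intro n m _ _
  show prime_numbers n m = prime_numbers_alt n m
  simp only [prime_numbers, prime_numbers_alt]
  rw [pvAlt_primes]
  have hA : (PySem.List.pyRange 2 (n + 1) 1).filter
      (fun p => (pvSieveLoopA n 2 (Array.replicate (n + 1).toNat true)).getD p.toNat false)
      = pvCl (n + 1) := by
    rw [← pvFiltersA_eq n]
    apply List.filter_congr
    intro k _
    rw [pvArrGetD, pvSieveLoopA_toList, Array.toList_replicate]
  rw [hA]
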